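-- pv_equiv track=rewrite | github.com/marcinpalyga/pwrMST | semestr 3/Algorytmy i struktury danych/lista 2/Marcin/zadanie 1.py | findbiggest
-- ===== SOURCE A (Python) =====
-- def findbiggest(s):
--     if len(s) == 1:
--         return s[0]
--     while len(s) > 1:
--         if s[0] >= s[1]:
--             s.pop(1)
--             return findbiggest(s)
--         else:
--             s.pop(0)
--             return findbiggest(s)
-- ===== SOURCE B (Python) =====
-- def findbiggest(s):
--     if not s:
--         return None
--     m = s[0]
--     for x in s[1:]:
--         if x > m:
--             m = x
--     return m
-- ===== Notes on version B (the rewrite author's own statement) =====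
-- stated objective: faster
-- what changed: Replaces A's recursion that pops one element per call (quadratic because of list.pop(0)/slicing per call) with a single non-mutating accumulator pass keeping the running maximum.
-- outside the precondition, e.g. on findbiggest([]): A returns None, B returns None
import Mathlib
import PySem

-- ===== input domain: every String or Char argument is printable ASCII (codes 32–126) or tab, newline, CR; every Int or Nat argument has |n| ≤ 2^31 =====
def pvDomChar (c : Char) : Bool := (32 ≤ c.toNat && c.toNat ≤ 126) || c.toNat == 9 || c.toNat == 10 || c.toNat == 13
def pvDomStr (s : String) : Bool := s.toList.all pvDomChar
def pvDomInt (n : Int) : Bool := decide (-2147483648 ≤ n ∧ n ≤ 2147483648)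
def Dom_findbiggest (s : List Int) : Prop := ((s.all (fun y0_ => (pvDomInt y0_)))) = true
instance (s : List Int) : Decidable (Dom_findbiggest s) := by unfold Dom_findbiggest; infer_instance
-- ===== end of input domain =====

-- B replaces A's recursion-with-pop by one accumulator pass (faster, and unlike A it
-- does not mutate its argument; the equivalence proved is about the return value only).

-- ===== PORT A =====
-- A: if len(s)==1 return s[0]; else pop the smaller of s[0],s[1] (index 1 on ties) and recurse.
def findbiggest (s : List Int) : Int :=
  match s with
  | [] => 0            -- unreachable under Pre_: Python A returns None here (no Int value)
  | [a] => a
  | a :: b :: t => if a ≥ b then findbiggest (a :: t) else findbiggest (b :: t)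

-- ===== PORT B =====
def findbiggest_alt (s : List Int) : Int :=
  match s with
  | [] => 0            -- unreachable under Pre_: Python B returns None here
  | m :: rest => rest.foldl (fun m x => if x > m then x else m) m

-- ===== PRECONDITION & SPEC =====
-- Pre_ excludes the empty list, on which both Pythons return None instead of an int.
def Pre_findbiggest (s : List Int) : Prop := s ≠ []
instance (s : List Int) : Decidable (Pre_findbiggest s) := by unfold Pre_findbiggest; infer_instance
def pvWitness_findbiggest : List Int := ([3, 1, 4, 1, 5])
def Spec_findbiggest (s : List Int) (out : Int) : Prop := out = findbiggest_alt s
instance (s : List Int) (out : Int) : Decidable (Spec_findbiggest s out) := by unfold Spec_findbiggest; infer_instance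

-- ===== CLAIM (what is proved, stated in full; the proofs are below) =====
def Claim_equal_findbiggest : Prop := ∀ (s : List Int), Dom_findbiggest s → Pre_findbiggest s → Spec_findbiggest s (findbiggest s)

-- ===== LEMMAS AND PROOFS =====
theorem findbiggest_cons_eq_foldl (t : List Int) : ∀ (a : Int),
    findbiggest (a :: t) = t.foldl (fun m x => if x > m then x else m) a := by
  induction t with
  | nil => intro a; simp [findbiggest]
  | cons b t ih =>
    intro a
    have hu : findbiggest (a :: b :: t) = (if a ≥ b then findbiggest (a :: t) else findbiggest (b :: t)) := by
      simp [findbiggest]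
    rw [hu, List.foldl_cons]
    by_cases h : a ≥ b
    · rw [if_pos h, ih a]
      have : (if b > a then b else a) = a := by rw [if_neg (by omega)]
      rw [this]
    · rw [if_neg h, ih b]
      have : (if b > a then b else a) = b := by rw [if_pos (by omega)]
      rw [this]

-- ===== VERDICT (by name: the statement is the Claim_ definition above) =====
theorem findbiggest_spec : Claim_equal_findbiggest := by
  intro s _ hpre
  match s with
  | [] => exact absurd rfl hpre
  | a :: t =>
    show findbiggest (a :: t) = findbiggest_alt (a :: t)
    rw [findbiggest_cons_eq_foldl]
    rfl
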